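-- pv_equiv track=rewrite | github.com/sakib-maho/csv-insights-cli | csv_insights/analyzer.py | profile_columns
-- ===== SOURCE A (Python) =====
-- def profile_columns(rows: list[dict[str, str]]) -> dict[str, dict[str, int]]:
--     """Return basic per-column profile (filled/missing/unique)."""
--     if not rows:
--         return {}
--
--     columns = list(rows[0].keys())
--     profile: dict[str, dict[str, int]] = {}
--     for column in columns:
--         values = [row.get(column, "") for row in rows]
--         filled = sum(1 for value in values if value.strip() != "")
--         unique = len({value for value in values if value.strip() != ""})
--         profile[column] = {
--             "filled": filled,
--             "missing": len(values) - filled,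
--             "unique": unique,
--         }
--     return profile
-- ===== SOURCE B (Python) =====
-- def profile_columns(rows: list[dict[str, str]]) -> dict[str, dict[str, int]]:
--     """Return basic per-column profile (filled/missing/unique)."""
--     if not rows:
--         return {}
--
--     def step(entry, row):
--         column, filled, seen = entry
--         value = row.get(column, "")
--         if value.strip() != "":
--             return (column, filled + 1, seen | {value})
--         return entry
--
--     state = [(column, 0, set()) for column in rows[0].keys()]
--     for row in rows:
--         state = [step(entry, row) for entry in state]
--
--     total = len(rows)
--     return {
--         column: {"filled": filled, "missing": total - filled, "unique": len(seen)}
--         for (column, filled, seen) in state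
--     }
-- ===== Notes on version B (the rewrite author's own statement) =====
-- stated objective: alternative
-- what changed: Replaces A's column-major decomposition (three scans over a materialized per-column value list for each column) with a single row-major pass that maintains a (column, filled, seen-set) accumulator per column and derives missing/unique at the end.
import Mathlib
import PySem

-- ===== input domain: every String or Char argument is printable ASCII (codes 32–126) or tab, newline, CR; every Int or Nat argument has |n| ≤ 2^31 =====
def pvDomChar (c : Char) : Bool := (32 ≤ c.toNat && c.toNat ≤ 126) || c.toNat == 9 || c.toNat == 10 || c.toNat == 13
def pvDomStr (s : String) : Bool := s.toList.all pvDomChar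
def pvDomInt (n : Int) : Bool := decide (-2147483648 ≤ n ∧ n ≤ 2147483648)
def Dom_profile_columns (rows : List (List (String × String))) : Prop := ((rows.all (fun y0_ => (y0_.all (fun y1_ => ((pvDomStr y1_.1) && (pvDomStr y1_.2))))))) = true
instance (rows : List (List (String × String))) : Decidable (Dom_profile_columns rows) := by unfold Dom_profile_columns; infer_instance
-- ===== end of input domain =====

-- B replaces A's column-major three-scan decomposition with a single row-major pass over
-- a list of (column, filled, seen-set) accumulators; same cost class, different structure.

-- ===== PORT A =====
def profile_columns (rows : List (List (String × String))) : List (String × List (String × Int)) :=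
  match rows with
  | [] => []
  | r0 :: _ =>
    let columns := (PySem.Dict.ofList r0).keys
    (columns.foldl (fun (profile : PySem.Dict String (List (String × Int))) column =>
        let values := rows.map (fun row => (PySem.Dict.ofList row).getD column "")
        let filled := values.foldl (fun acc value => if PySem.Str.strip value != "" then acc + 1 else acc) (0 : Int)
        let unique := PySem.Set.len (PySem.Set.ofList (values.filter (fun value => PySem.Str.strip value != "")))
        profile.insert column
          [("filled", filled), ("missing", PySem.List.len values - filled), ("unique", unique)])
      PySem.Dict.empty).items

-- ===== PORT B =====
def profile_columns_alt (rows : List (List (String × String))) : List (String × List (String × Int)) :=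
  match rows with
  | [] => []
  | r0 :: _ =>
    let init := (PySem.Dict.ofList r0).keys.map
      (fun column => (column, (0 : Int), (PySem.Set.empty : PySem.Set String)))
    let state := rows.foldl (fun st row => st.map (fun entry =>
        let value := (PySem.Dict.ofList row).getD entry.1 ""
        if PySem.Str.strip value != "" then (entry.1, entry.2.1 + 1, PySem.Set.add entry.2.2 value)
        else entry)) init
    state.map (fun entry =>
      (entry.1, [("filled", entry.2.1), ("missing", PySem.List.len rows - entry.2.1),
                 ("unique", PySem.Set.len entry.2.2)]))

-- ===== PRECONDITION & SPEC =====
def Spec_profile_columns (rows : List (List (String × String))) (out : List (String × List (String × Int))) : Prop := out = profile_columns_alt rows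
instance (rows : List (List (String × String))) (out : List (String × List (String × Int))) : Decidable (Spec_profile_columns rows out) := by unfold Spec_profile_columns; infer_instance

-- ===== CLAIM (what is proved, stated in full; the proofs are below) =====
def Claim_equal_profile_columns : Prop := ∀ (rows : List (List (String × String))), Dom_profile_columns rows → Spec_profile_columns rows (profile_columns rows)

-- ===== LEMMAS AND PROOFS =====

-- Folding a per-row elementwise map over the whole state list is the same as folding the rows
-- into each state element independently.
theorem foldl_map_swap {ρ α : Type} (rows : List ρ) (g : ρ → α → α) (l : List α) :
    rows.foldl (fun st row => st.map (g row)) l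
      = l.map (fun x => rows.foldl (fun x row => g row x) x) := by
  induction rows generalizing l with
  | nil => simp
  | cons r rs ih => simp [List.foldl_cons, ih, List.map_map, Function.comp_def]

-- B's per-column accumulator fold computes A's per-column count and A's per-column value set.
theorem colFold (rows : List (List (String × String))) (column : String) (f : Int)
    (s : PySem.Set String) :
    rows.foldl (fun (x : String × Int × PySem.Set String) row =>
        let value := (PySem.Dict.ofList row).getD x.1 ""
        if PySem.Str.strip value != "" then (x.1, x.2.1 + 1, PySem.Set.add x.2.2 value) else x)
      (column, f, s)
      = (column,
         (rows.map (fun row => (PySem.Dict.ofList row).getD column "")).foldl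
           (fun acc value => if PySem.Str.strip value != "" then acc + 1 else acc) f,
         ((rows.map (fun row => (PySem.Dict.ofList row).getD column "")).filter
           (fun value => PySem.Str.strip value != "")).foldl PySem.Set.add s) := by
  induction rows generalizing f s with
  | nil => simp
  | cons r rs ih =>
    simp only [List.foldl_cons, List.map_cons, List.filter_cons]
    by_cases h : PySem.Str.strip ((PySem.Dict.ofList r).getD column "") = ""
    · simpa [h] using ih f s
    · simpa [h] using ih (f + 1) (PySem.Set.add s ((PySem.Dict.ofList r).getD column ""))

-- Inserting a list of fresh, pairwise-distinct keys appends them in order.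
theorem items_foldl_insert_fresh (columns : List String)
    (f : String → List (String × Int)) (init : List (String × List (String × Int)))
    (hfresh : ∀ c ∈ columns, c ∉ (PySem.Dict.mk init).keys) (hnd : columns.Nodup) :
    (columns.foldl (fun d c => d.insert c (f c)) (PySem.Dict.mk init)).items
      = init ++ columns.map (fun c => (c, f c)) := by
  induction columns generalizing init with
  | nil => simp
  | cons c cs ih =>
    have hc : ¬ (PySem.Dict.mk init).contains c := by
      intro h
      exact hfresh c (by simp) (((PySem.Dict.mk init).contains_iff_mem_keys c).mp h)
    simp only [List.foldl_cons]
    have hins : (PySem.Dict.mk init).insert c (f c) = PySem.Dict.mk (init ++ [(c, f c)]) := by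
      simp [PySem.Dict.insert, hc]
    rw [hins, ih (init ++ [(c, f c)])]
    · simp
    · intro c' hc'
      simp only [PySem.Dict.keys, List.map_append, List.mem_append]
      rintro (h | h)
      · exact hfresh c' (by simp [hc']) h
      · simp at h
        exact (List.nodup_cons.mp hnd).1 (h ▸ hc')
    · exact hnd.of_cons

-- ===== VERDICT (by name: the statement is the Claim_ definition above) =====
theorem profile_columns_spec : Claim_equal_profile_columns := by
  intro rows _
  unfold Spec_profile_columns
  match rows with
  | [] => rfl
  | r0 :: rest =>
    unfold profile_columns profile_columns_alt
    simp only
    rw [foldl_map_swap]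
    have hempty : (PySem.Dict.empty : PySem.Dict String (List (String × Int))) = PySem.Dict.mk [] := rfl
    rw [hempty, items_foldl_insert_fresh _ _ []
      (by intro c _; simp [PySem.Dict.keys]) (PySem.Dict.nodup_keys_ofList r0)]
    simp only [List.nil_append, List.map_map]
    apply List.map_congr_left
    intro c _
    simp only [Function.comp_apply]
    rw [colFold]
    simp [PySem.Set.ofList_eq_foldl, PySem.Set.empty, PySem.List.len_eq]
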